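-- pv_equiv track=rewrite | github.com/YangTaeUk/coddingtest_study | 간단 문제/아이템줍기/answer.py | incoordinates
-- ===== SOURCE A (Python) =====
-- def incoordinates(rectangle, coordinates):
--     if rectangle[0] < rectangle[2]: bigx, smallx = rectangle[2], rectangle[0]
--     else: bigx, smallx = rectangle[0], rectangle[2]
--     if rectangle[1] < rectangle[3]: bigy, smally = rectangle[3], rectangle[1]
--     else : bigy, smally = rectangle[1], rectangle[3]
--     bigx = bigx * 2
--     smallx = smallx * 2
--     bigy = bigy * 2
--     smally = smally * 2
--
--     for i in range(smallx, bigx + 1):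
--         for j in range(smally, bigy + 1):
--             if coordinates[j][i] == 0 or coordinates[j][i] == 3:
--                 if i == smallx or j == smally or i == bigx or j == bigy:
--                     coordinates[j][i] = 3
--                 else:
--                     coordinates[j][i] = 5
--
--     return coordinates
-- ===== SOURCE B (Python) =====
-- def incoordinates(rectangle, coordinates):
--     sx, bx = 2 * min(rectangle[0], rectangle[2]), 2 * max(rectangle[0], rectangle[2])
--     sy, by = 2 * min(rectangle[1], rectangle[3]), 2 * max(rectangle[1], rectangle[3])
--
--     def paint(i, j, v):
--         if coordinates[j][i] in (0, 3):
--             coordinates[j][i] = v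
--
--     for i in range(sx, bx + 1):          # top and bottom edge of the (doubled) rectangle
--         paint(i, sy, 3)
--         paint(i, by, 3)
--     for j in range(sy, by + 1):          # left and right edge
--         paint(sx, j, 3)
--         paint(bx, j, 3)
--     for i in range(sx + 1, bx):          # strict interior
--         for j in range(sy + 1, by):
--             paint(i, j, 5)
--     return coordinates
-- ===== Notes on version B (the rewrite author's own statement) =====
-- stated objective: alternative
-- what changed: B replaces A's single nested scan with an on-boundary branch inside the loop body by three differently shaped passes: one loop painting the top and bottom edges, one painting the left and right edges, and a nested loop painting only the strict interior.
import Mathlib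
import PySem

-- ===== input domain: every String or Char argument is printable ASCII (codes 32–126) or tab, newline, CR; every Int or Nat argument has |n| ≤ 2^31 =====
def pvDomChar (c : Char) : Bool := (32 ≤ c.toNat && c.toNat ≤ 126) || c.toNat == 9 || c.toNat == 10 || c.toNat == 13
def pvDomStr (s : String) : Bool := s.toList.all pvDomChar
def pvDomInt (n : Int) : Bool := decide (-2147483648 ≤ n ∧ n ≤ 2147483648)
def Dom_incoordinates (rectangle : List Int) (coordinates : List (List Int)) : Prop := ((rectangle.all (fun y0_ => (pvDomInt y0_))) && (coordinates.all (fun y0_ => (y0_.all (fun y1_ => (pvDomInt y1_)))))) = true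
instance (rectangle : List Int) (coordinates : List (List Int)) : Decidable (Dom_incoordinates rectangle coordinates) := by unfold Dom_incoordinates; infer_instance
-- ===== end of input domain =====

-- B replaces A's single nested scan (with an on-boundary branch per cell) by three differently
-- shaped passes: top/bottom edges, left/right edges, then the strict interior. Both Pythons
-- mutate `coordinates` in place the same way; the theorems are about the RETURN value.

-- ===== PORT A =====
-- one body-step of A's nested loop: read coordinates[j][i] (negative index wraps; none =
-- IndexError, excluded by Pre_), and if it is 0 or 3 write 3 on the rectangle boundary, 5 inside
def pvStepA (sx bx sy byy : Int) (g : List (List Int)) (i j : Int) : List (List Int) :=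
  match PySem.List.pyGet? g j with
  | none => g
  | some row =>
    match PySem.List.pyGet? row i with
    | none => g
    | some c =>
      if c = 0 ∨ c = 3 then
        PySem.List.pySetD g j (PySem.List.pySetD row i
          (if i = sx ∨ j = sy ∨ i = bx ∨ j = byy then 3 else 5))
      else g

-- rectangle[k] is read with pyGetD (default 0): under Pre_ (4 ≤ rectangle.length) this is exact;
-- a shorter rectangle raises IndexError in Python and is excluded by Pre_
def incoordinates (rectangle : List Int) (coordinates : List (List Int)) : List (List Int) :=
  let r0 := PySem.List.pyGetD rectangle 0 0
  let r1 := PySem.List.pyGetD rectangle 1 0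
  let r2 := PySem.List.pyGetD rectangle 2 0
  let r3 := PySem.List.pyGetD rectangle 3 0
  let px := if r0 < r2 then (r2, r0) else (r0, r2)
  let py := if r1 < r3 then (r3, r1) else (r1, r3)
  let bigx := px.1 * 2
  let smallx := px.2 * 2
  let bigy := py.1 * 2
  let smally := py.2 * 2
  (PySem.List.pyRange smallx (bigx + 1) 1).foldl
    (fun g i =>
      (PySem.List.pyRange smally (bigy + 1) 1).foldl
        (fun g j => pvStepA smallx bigx smally bigy g i j) g)
    coordinates

-- ===== PORT B =====
-- B's paint(i, j, v): read coordinates[j][i] and write v if the cell holds 0 or 3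
def pvPaint (g : List (List Int)) (i j v : Int) : List (List Int) :=
  match PySem.List.pyGet? g j with
  | none => g
  | some row =>
    match PySem.List.pyGet? row i with
    | none => g
    | some c =>
      if c = 0 ∨ c = 3 then PySem.List.pySetD g j (PySem.List.pySetD row i v) else g

def incoordinates_alt (rectangle : List Int) (coordinates : List (List Int)) : List (List Int) :=
  let sx := 2 * min (PySem.List.pyGetD rectangle 0 0) (PySem.List.pyGetD rectangle 2 0)
  let bx := 2 * max (PySem.List.pyGetD rectangle 0 0) (PySem.List.pyGetD rectangle 2 0)
  let sy := 2 * min (PySem.List.pyGetD rectangle 1 0) (PySem.List.pyGetD rectangle 3 0)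
  let byy := 2 * max (PySem.List.pyGetD rectangle 1 0) (PySem.List.pyGetD rectangle 3 0)
  let g1 := (PySem.List.pyRange sx (bx + 1) 1).foldl
    (fun g i => pvPaint (pvPaint g i sy 3) i byy 3) coordinates
  let g2 := (PySem.List.pyRange sy (byy + 1) 1).foldl
    (fun g j => pvPaint (pvPaint g sx j 3) bx j 3) g1
  (PySem.List.pyRange (sx + 1) bx 1).foldl
    (fun g i => (PySem.List.pyRange (sy + 1) byy 1).foldl
      (fun g j => pvPaint g i j 5) g) g2

-- ===== PRECONDITION & SPEC =====
-- Pre_ admits exactly the inputs on which A returns: rectangle has its four entries and every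
-- cell access coordinates[j][i] of the loops is a valid (possibly negative, wrapping) Python
-- index — otherwise A raises IndexError.
def Pre_incoordinates (rectangle : List Int) (coordinates : List (List Int)) : Prop :=
  let sx := 2 * min (PySem.List.pyGetD rectangle 0 0) (PySem.List.pyGetD rectangle 2 0)
  let bx := 2 * max (PySem.List.pyGetD rectangle 0 0) (PySem.List.pyGetD rectangle 2 0)
  let sy := 2 * min (PySem.List.pyGetD rectangle 1 0) (PySem.List.pyGetD rectangle 3 0)
  let byy := 2 * max (PySem.List.pyGetD rectangle 1 0) (PySem.List.pyGetD rectangle 3 0)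
  4 ≤ rectangle.length ∧
  -(coordinates.length : Int) ≤ sy ∧ byy < (coordinates.length : Int) ∧
  ∀ k ∈ List.range coordinates.length,
    ((sy ≤ (k : Int) ∧ (k : Int) ≤ byy) ∨
     (sy ≤ (k : Int) - coordinates.length ∧ (k : Int) - coordinates.length ≤ byy)) →
    (-(((coordinates.getD k []).length : Int)) ≤ sx ∧
     bx < ((coordinates.getD k []).length : Int))

instance (rectangle : List Int) (coordinates : List (List Int)) : Decidable (Pre_incoordinates rectangle coordinates) := by
  unfold Pre_incoordinates; infer_instance

def pvWitness_incoordinates : List Int × List (List Int) :=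
  ([0, 0, 1, 1], [[0, 0, 0], [0, 0, 0], [0, 0, 0]])

def Spec_incoordinates (rectangle : List Int) (coordinates : List (List Int)) (out : List (List Int)) : Prop := out = incoordinates_alt rectangle coordinates
instance (rectangle : List Int) (coordinates : List (List Int)) (out : List (List Int)) : Decidable (Spec_incoordinates rectangle coordinates out) := by unfold Spec_incoordinates; infer_instance

-- ===== CLAIM (what is proved, stated in full; the proofs are below) =====
def Claim_equal_incoordinates : Prop := ∀ (rectangle : List Int) (coordinates : List (List Int)), Dom_incoordinates rectangle coordinates → Pre_incoordinates rectangle coordinates → Spec_incoordinates rectangle coordinates (incoordinates rectangle coordinates)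

-- ===== LEMMAS AND PROOFS =====

-- the value A (and B) leaves in a cell holding c when its loop visits signed position (i, j)
def pvF (sx bx sy byy i j c : Int) : Int :=
  if c = 0 ∨ c = 3 then (if i = sx ∨ j = sy ∨ i = bx ∨ j = byy then 3 else 5) else c

-- Python index normalisation: the physical index addressed by xs[j]
def pvWrap (n : Nat) (j : Int) : Nat := if 0 ≤ j then j.toNat else n - (-j).toNat

-- the physical (row, column) cell addressed by the signed pair p = (i, j) on grid g0
def pvPhys (g0 : List (List Int)) (p : Int × Int) : Nat × Nat :=
  (pvWrap g0.length p.2, pvWrap (g0.getD (pvWrap g0.length p.2) []).length p.1)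

-- proof-side view of the grid: every cell rewritten by a physical-position function
def pvMapGrid (u : Nat → Nat → Int → Int) (g : List (List Int)) : List (List Int) :=
  g.mapIdx (fun k row => row.mapIdx (fun l v => u k l v))

lemma pvWrap_lt (n : Nat) (j : Int) (h1 : -(n : Int) ≤ j) (h2 : j < n) : pvWrap n j < n := by
  unfold pvWrap; split <;> omega

lemma pyIdx?_wrap (n : Nat) (j : Int) (h1 : -(n : Int) ≤ j) (h2 : j < n) :
    PySem.List.pyIdx? n j = some (pvWrap n j) := by
  unfold PySem.List.pyIdx? pvWrap
  split_ifs <;> rfl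

lemma pyGet?_wrap {α : Type} (xs : List α) (j : Int) (h1 : -(xs.length : Int) ≤ j)
    (_h2 : j < xs.length) :
    PySem.List.pyGet? xs j = xs[pvWrap xs.length j]? := by
  by_cases hj : 0 ≤ j
  · have hw : pvWrap xs.length j = j.toNat := by unfold pvWrap; rw [if_pos hj]
    rw [PySem.List.pyGet?_of_nonneg (h := hj), hw]
  · have hw : pvWrap xs.length j = xs.length - (-j).toNat := by unfold pvWrap; rw [if_neg hj]
    have hk1 : 0 < (-j).toNat := by omega
    have hk2 : (-j).toNat ≤ xs.length := by omega
    have hjj : j = -(((-j).toNat : Nat) : Int) := by omega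
    rw [hw]
    calc PySem.List.pyGet? xs j
        = PySem.List.pyGet? xs (-(((-j).toNat : Nat) : Int)) := by rw [← hjj]
      _ = xs[xs.length - (-j).toNat]? := PySem.List.pyGet?_neg_natCast xs _ hk1 hk2

lemma pySetD_wrap {α : Type} (xs : List α) (j : Int) (v : α) (h1 : -(xs.length : Int) ≤ j)
    (h2 : j < xs.length) :
    PySem.List.pySetD xs j v = xs.set (pvWrap xs.length j) v := by
  unfold PySem.List.pySetD PySem.List.pySet?
  rw [pyIdx?_wrap xs.length j h1 h2]
  rfl

lemma length_pvMapGrid (u : Nat → Nat → Int → Int) (g : List (List Int)) :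
    (pvMapGrid u g).length = g.length := by
  simp [pvMapGrid]

lemma getElem_pvMapGrid (u : Nat → Nat → Int → Int) (g : List (List Int)) (k : Nat)
    (h : k < g.length) :
    (pvMapGrid u g)[k]'(by rw [length_pvMapGrid]; exact h)
      = g[k].mapIdx (fun l v => u k l v) := by
  simp [pvMapGrid]

lemma pvMapGrid_id (g : List (List Int)) : pvMapGrid (fun _ _ v => v) g = g := by
  unfold pvMapGrid
  apply List.ext_getElem
  · simp
  · intro k hk hk'
    simp only [List.getElem_mapIdx]
    apply List.ext_getElem
    · simp
    · intro l hl hl'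
      simp

lemma pvMapGrid_pointUpd (f : Int → Int) (u : Nat → Nat → Int → Int) (g : List (List Int))
    (n m : Nat) (hj : n < g.length) (hi : m < g[n].length) :
    pvMapGrid (fun k l v => if k = n ∧ l = m then f (u k l v) else u k l v) g
      = (pvMapGrid u g).set n
          ((g[n].mapIdx (fun l v => u n l v)).set m (f (u n m g[n][m]))) := by
  apply List.ext_getElem
  · simp [length_pvMapGrid]
  · intro k hk hk'
    have hkg : k < g.length := by simpa [length_pvMapGrid] using hk
    rw [getElem_pvMapGrid _ g k hkg, List.getElem_set]
    by_cases hkn : k = n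
    · subst hkn
      rw [if_pos rfl]
      apply List.ext_getElem
      · simp
      · intro l hl hl'
        have hlg : l < g[k].length := by simpa using hl
        rw [List.getElem_set]
        simp only [List.getElem_mapIdx]
        by_cases hlm : l = m
        · subst hlm
          simp
        · have hml : ¬ (m = l) := fun h => hlm h.symm
          rw [if_neg (by simp [hlm]), if_neg hml]
    · rw [if_neg (show ¬ n = k from fun h => hkn h.symm), getElem_pvMapGrid u g k hkg]
      apply List.ext_getElem
      · simp
      · intro l hl hl'
        simp only [List.getElem_mapIdx]
        rw [if_neg (by simp [hkn])]

-- a step of either Python at signed (i, j) is a point update at the physical cell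
lemma pvStepA_mapGrid (sx bx sy byy : Int) (g : List (List Int)) (u : Nat → Nat → Int → Int)
    (i j : Int) (hj1 : -(g.length : Int) ≤ j) (hj2 : j < g.length)
    (hi1 : -(((g.getD (pvWrap g.length j) []).length : Int)) ≤ i)
    (hi2 : i < ((g.getD (pvWrap g.length j) []).length : Int)) :
    pvStepA sx bx sy byy (pvMapGrid u g) i j
      = pvMapGrid (fun k l v =>
          if k = pvWrap g.length j ∧ l = pvWrap (g.getD (pvWrap g.length j) []).length i then
            pvF sx bx sy byy i j (u k l v)
          else u k l v) g := by
  set n := pvWrap g.length j with hn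
  have hnlt : n < g.length := pvWrap_lt _ _ hj1 hj2
  have hgd : g.getD n [] = g[n] := List.getD_eq_getElem g [] hnlt
  rw [hgd] at hi1 hi2 ⊢
  set m := pvWrap g[n].length i with hm
  have hmlt : m < g[n].length := pvWrap_lt _ _ hi1 hi2
  have hlen : (pvMapGrid u g).length = g.length := length_pvMapGrid u g
  have h1 : PySem.List.pyGet? (pvMapGrid u g) j
      = some (g[n].mapIdx (fun l v => u n l v)) := by
    rw [pyGet?_wrap _ j (by omega) (by omega)]
    have hwj : pvWrap (pvMapGrid u g).length j = n := by rw [hlen]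
    rw [hwj, List.getElem?_eq_getElem (by rw [hlen]; exact hnlt),
      getElem_pvMapGrid u g n hnlt]
  have hrowlen : (g[n].mapIdx (fun l v => u n l v)).length = g[n].length := by simp
  have h2 : PySem.List.pyGet? (g[n].mapIdx (fun l v => u n l v)) i
      = some (u n m g[n][m]) := by
    rw [pyGet?_wrap _ i (by rw [hrowlen]; omega) (by rw [hrowlen]; omega)]
    have hwi : pvWrap (g[n].mapIdx (fun l v => u n l v)).length i = m := by rw [hrowlen]
    rw [hwi, List.getElem?_eq_getElem (by rw [hrowlen]; exact hmlt)]
    simp only [List.getElem_mapIdx]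
  unfold pvStepA
  simp only [h1]
  simp only [h2]
  rw [pvMapGrid_pointUpd (pvF sx bx sy byy i j) u g n m hnlt hmlt]
  by_cases hc : u n m g[n][m] = 0 ∨ u n m g[n][m] = 3
  · rw [if_pos hc]
    rw [pySetD_wrap _ j _ (by rw [hlen]; omega) (by rw [hlen]; omega),
        pySetD_wrap _ i _ (by rw [hrowlen]; omega) (by rw [hrowlen]; omega)]
    have hwj : pvWrap (pvMapGrid u g).length j = n := by rw [hlen]
    have hwi : pvWrap (g[n].mapIdx (fun l v => u n l v)).length i = m := by rw [hrowlen]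
    rw [hwj, hwi]
    have : pvF sx bx sy byy i j (u n m g[n][m])
        = (if i = sx ∨ j = sy ∨ i = bx ∨ j = byy then 3 else 5) := by
      simp [pvF, hc]
    rw [this]
  · rw [if_neg hc]
    have hFe : pvF sx bx sy byy i j (u n m g[n][m]) = u n m g[n][m] := by
      simp [pvF, hc]
    rw [hFe]
    have hrow : (g[n].mapIdx (fun l v => u n l v)).set m (u n m g[n][m])
        = g[n].mapIdx (fun l v => u n l v) := by
      have hv : u n m g[n][m]
          = (g[n].mapIdx (fun l v => u n l v))[m]'(by rw [hrowlen]; exact hmlt) := by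
        simp [List.getElem_mapIdx]
      rw [hv, List.set_getElem_self]
    rw [hrow]
    have hg : (pvMapGrid u g).set n (g[n].mapIdx (fun l v => u n l v)) = pvMapGrid u g := by
      have hv : g[n].mapIdx (fun l v => u n l v)
          = (pvMapGrid u g)[n]'(by rw [hlen]; exact hnlt) :=
        (getElem_pvMapGrid u g n hnlt).symm
      rw [hv, List.set_getElem_self]
    rw [hg]

-- a cell holding c after one visit at signed position p
-- folding any list of in-range signed writes acts on each physical cell independently:
-- the cell value is folded through exactly its own visitors, in their order
lemma pvFoldGen (sx bx sy byy : Int) (g0 : List (List Int)) :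
    ∀ ps : List (Int × Int),
    (∀ p ∈ ps,
       -(g0.length : Int) ≤ p.2 ∧ p.2 < g0.length ∧
       -(((g0.getD (pvWrap g0.length p.2) []).length : Int)) ≤ p.1 ∧
       p.1 < ((g0.getD (pvWrap g0.length p.2) []).length : Int)) →
    ∀ u : Nat → Nat → Int → Int,
    ps.foldl (fun g p => pvStepA sx bx sy byy g p.1 p.2) (pvMapGrid u g0)
      = pvMapGrid (fun k l v =>
          (ps.filter (fun p => pvPhys g0 p = (k, l))).foldl
            (fun c p => pvF sx bx sy byy p.1 p.2 c) (u k l v)) g0 := by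
  intro ps
  induction ps with
  | nil =>
    intro _ u
    simp
  | cons p ps ih =>
    intro hin u
    obtain ⟨hj1, hj2, hi1, hi2⟩ := hin p (List.mem_cons_self)
    rw [List.foldl_cons,
        pvStepA_mapGrid sx bx sy byy g0 u p.1 p.2 hj1 hj2 hi1 hi2]
    have hstep :
        (fun k l v =>
          if k = pvWrap g0.length p.2 ∧ l = pvWrap (g0.getD (pvWrap g0.length p.2) []).length p.1 then
            pvF sx bx sy byy p.1 p.2 (u k l v)
          else u k l v)
        = (fun k l v =>
          if (k, l) = pvPhys g0 p then pvF sx bx sy byy p.1 p.2 (u k l v) else u k l v) := by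
      funext k l v
      by_cases hkl : (k, l) = pvPhys g0 p
      · have hk : k = (pvPhys g0 p).1 := by rw [← hkl]
        have hl : l = (pvPhys g0 p).2 := by rw [← hkl]
        have hk' : k = pvWrap g0.length p.2 := by rw [hk]; rfl
        have hl' : l = pvWrap (g0.getD (pvWrap g0.length p.2) []).length p.1 := by rw [hl]; rfl
        rw [if_pos ⟨hk', hl'⟩, if_pos hkl]
      · rw [if_neg (fun hc => hkl (Prod.ext hc.1 hc.2)), if_neg hkl]
    rw [hstep, ih (fun q hq => hin q (List.mem_cons_of_mem _ hq))]
    congr 1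
    funext k l v
    rw [List.filter_cons]
    by_cases hkl : pvPhys g0 p = (k, l)
    · have hd : decide (pvPhys g0 p = (k, l)) = true := by simpa using hkl
      rw [if_pos hkl.symm, hd, if_pos rfl, List.foldl_cons]
    · have hd : decide (pvPhys g0 p = (k, l)) = false := by simpa using hkl
      rw [if_neg (fun h => hkl h.symm), hd, if_neg (by simp)]

-- the per-cell value after a sequence of visits: any non-boundary visitor freezes the cell at
-- 5, otherwise any visitor leaves 3, otherwise the cell keeps its value
lemma pvSeq_spec (sx bx sy byy : Int) :
    ∀ (qs : List (Int × Int)) (v : Int),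
    qs.foldl (fun c p => pvF sx bx sy byy p.1 p.2 c) v
      = if v = 0 ∨ v = 3 then
          (if ∃ p ∈ qs, ¬(p.1 = sx ∨ p.2 = sy ∨ p.1 = bx ∨ p.2 = byy) then 5
           else if qs = [] then v else 3)
        else v := by
  intro qs
  induction qs with
  | nil =>
    intro v
    simp
  | cons q qs ih =>
    intro v
    rw [List.foldl_cons, ih]
    by_cases hv : v = 0 ∨ v = 3
    · by_cases hb : q.1 = sx ∨ q.2 = sy ∨ q.1 = bx ∨ q.2 = byy
      · have h3 : pvF sx bx sy byy q.1 q.2 v = 3 := by simp [pvF, hv, hb]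
        rw [h3]
        simp only [List.exists_mem_cons_iff, hb, not_true_eq_false, false_or]
        rw [if_pos hv, if_pos (by norm_num)]
        by_cases hex : ∃ p ∈ qs, ¬(p.1 = sx ∨ p.2 = sy ∨ p.1 = bx ∨ p.2 = byy)
        · rw [if_pos hex, if_pos hex]
        · rw [if_neg hex, if_neg hex, ite_self]
          simp
      · have h5 : pvF sx bx sy byy q.1 q.2 v = 5 := by simp [pvF, hv, hb]
        rw [h5]
        rw [if_neg (by norm_num), if_pos hv,
            if_pos (⟨q, List.mem_cons_self, hb⟩ :
              ∃ p ∈ q :: qs, ¬(p.1 = sx ∨ p.2 = sy ∨ p.1 = bx ∨ p.2 = byy))]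
    · have hid : pvF sx bx sy byy q.1 q.2 v = v := by simp [pvF, hv]
      rw [hid, if_neg hv, if_neg hv]

-- B's paint steps with the edge/interior constants are exactly A's step
lemma pvStepA_eq_paint (sx bx sy byy : Int) (g : List (List Int)) (i j : Int) :
    pvStepA sx bx sy byy g i j
      = pvPaint g i j (if i = sx ∨ j = sy ∨ i = bx ∨ j = byy then 3 else 5) := rfl

-- the signed visit sets of A and of B's three passes coincide: the full doubled rectangle
lemma pv_mem_psB (sx bx sy byy : Int) (hx : sx ≤ bx) (hy : sy ≤ byy) (p : Int × Int) :
    (p ∈ ((PySem.List.pyRange sx (bx + 1) 1).flatMap (fun i => [(i, sy), (i, byy)]) ++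
          ((PySem.List.pyRange sy (byy + 1) 1).flatMap (fun j => [(sx, j), (bx, j)]) ++
           (PySem.List.pyRange (sx + 1) bx 1).flatMap
             (fun i => (PySem.List.pyRange (sy + 1) byy 1).map (fun j => (i, j))))))
    ↔ (sx ≤ p.1 ∧ p.1 ≤ bx ∧ sy ≤ p.2 ∧ p.2 ≤ byy) := by
  obtain ⟨pi, pj⟩ := p
  simp only [List.mem_append, List.mem_flatMap, List.mem_map, List.mem_cons,
    List.not_mem_nil, or_false, PySem.List.mem_pyRange_one, Prod.mk.injEq]
  constructor
  · rintro (⟨i, hi, (⟨rfl, rfl⟩ | ⟨rfl, rfl⟩)⟩ | ⟨j, hj, (⟨rfl, rfl⟩ | ⟨rfl, rfl⟩)⟩ |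
      ⟨i, hi, j, hj, rfl, rfl⟩) <;> omega
  · rintro ⟨h1, h2, h3, h4⟩
    by_cases hj : pj = sy ∨ pj = byy
    · exact Or.inl ⟨pi, by omega, by rcases hj with h | h <;> simp [h]⟩
    · by_cases hi : pi = sx ∨ pi = bx
      · refine Or.inr (Or.inl ⟨pj, by omega, ?_⟩)
        rcases hi with h | h <;> simp [h]
      · exact Or.inr (Or.inr ⟨pi, by omega, pj, by omega, rfl, rfl⟩)

lemma pv_mem_psA (sx bx sy byy : Int) (p : Int × Int) :
    (p ∈ (PySem.List.pyRange sx (bx + 1) 1).flatMap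
        (fun i => (PySem.List.pyRange sy (byy + 1) 1).map (fun j => (i, j))))
    ↔ (sx ≤ p.1 ∧ p.1 ≤ bx ∧ sy ≤ p.2 ∧ p.2 ≤ byy) := by
  obtain ⟨pi, pj⟩ := p
  simp only [List.mem_flatMap, List.mem_map, PySem.List.mem_pyRange_one, Prod.mk.injEq]
  constructor
  · rintro ⟨i, hi, j, hj, rfl, rfl⟩; omega
  · rintro ⟨h1, h2, h3, h4⟩; exact ⟨pi, by omega, pj, by omega, rfl, rfl⟩

-- ===== VERDICT (by name: the statement is the Claim_ definition above) =====
theorem incoordinates_spec : Claim_equal_incoordinates := by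
  intro rectangle coordinates _ hPre
  unfold Pre_incoordinates at hPre
  obtain ⟨hlen, hy1, hy2, hrow⟩ := hPre
  unfold Spec_incoordinates
  simp only [incoordinates, incoordinates_alt]
  set r0 := PySem.List.pyGetD rectangle 0 0 with hr0
  set r1 := PySem.List.pyGetD rectangle 1 0 with hr1
  set r2 := PySem.List.pyGetD rectangle 2 0 with hr2
  set r3 := PySem.List.pyGetD rectangle 3 0 with hr3
  have hx : (if r0 < r2 then (r2, r0) else (r0, r2)) = (max r0 r2, min r0 r2) := by
    split_ifs with h
    · rw [max_eq_right h.le, min_eq_left h.le]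
    · rw [max_eq_left (not_lt.mp h), min_eq_right (not_lt.mp h)]
  have hy : (if r1 < r3 then (r3, r1) else (r1, r3)) = (max r1 r3, min r1 r3) := by
    split_ifs with h
    · rw [max_eq_right h.le, min_eq_left h.le]
    · rw [max_eq_left (not_lt.mp h), min_eq_right (not_lt.mp h)]
  rw [hx, hy]
  simp only []
  have hsx2 : max r0 r2 * 2 = 2 * max r0 r2 := by ring
  have hsx3 : min r0 r2 * 2 = 2 * min r0 r2 := by ring
  have hsy2 : max r1 r3 * 2 = 2 * max r1 r3 := by ring
  have hsy3 : min r1 r3 * 2 = 2 * min r1 r3 := by ring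
  rw [hsx2, hsx3, hsy2, hsy3]
  set sx := 2 * min r0 r2 with hsx
  set bx := 2 * max r0 r2 with hbx
  set sy := 2 * min r1 r3 with hsy
  set byy := 2 * max r1 r3 with hbyy
  have hxle : sx ≤ bx := by
    rw [hsx, hbx]; have := min_le_max (a := r0) (b := r2); omega
  have hyle : sy ≤ byy := by
    rw [hsy, hbyy]; have := min_le_max (a := r1) (b := r3); omega
  set g0 := coordinates with hg0
  -- every signed pair of the doubled rectangle addresses a cell in wrapping range
  have hmaster : ∀ p : Int × Int, sx ≤ p.1 → p.1 ≤ bx → sy ≤ p.2 → p.2 ≤ byy →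
      -(g0.length : Int) ≤ p.2 ∧ p.2 < g0.length ∧
      -(((g0.getD (pvWrap g0.length p.2) []).length : Int)) ≤ p.1 ∧
      p.1 < ((g0.getD (pvWrap g0.length p.2) []).length : Int) := by
    rintro ⟨pi, pj⟩ h1 h2 h3 h4
    have hj1 : -(g0.length : Int) ≤ pj := by omega
    have hj2 : pj < g0.length := by omega
    set n := pvWrap g0.length pj with hn
    have hnlt : n < g0.length := pvWrap_lt _ _ hj1 hj2
    have hncast : (n : Int) = if 0 ≤ pj then pj else pj + g0.length := by
      rw [hn]; unfold pvWrap; split_ifs <;> omega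
    have htouched : ((sy ≤ (n : Int) ∧ (n : Int) ≤ byy) ∨
        (sy ≤ (n : Int) - g0.length ∧ (n : Int) - g0.length ≤ byy)) := by
      by_cases hpj : 0 ≤ pj
      · left; rw [hncast, if_pos hpj]; omega
      · right; rw [hncast, if_neg hpj]; omega
    obtain ⟨hw1, hw2⟩ := hrow n (List.mem_range.mpr hnlt) htouched
    have hi1 : -(((g0.getD n []).length : Int)) ≤ pi := by omega
    have hi2 : pi < ((g0.getD n []).length : Int) := by omega
    exact ⟨hj1, hj2, hi1, hi2⟩
  -- A's nested loop as a fold over the signed product list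
  set psA := (PySem.List.pyRange sx (bx + 1) 1).flatMap
      (fun i => (PySem.List.pyRange sy (byy + 1) 1).map (fun j => (i, j))) with hpsA
  have hA : (PySem.List.pyRange sx (bx + 1) 1).foldl
      (fun g i => (PySem.List.pyRange sy (byy + 1) 1).foldl
        (fun g j => pvStepA sx bx sy byy g i j) g) g0
      = psA.foldl (fun g p => pvStepA sx bx sy byy g p.1 p.2) g0 := by
    rw [hpsA, List.foldl_flatMap]
    simp [List.foldl_map]
  -- B's three passes as a fold over its signed visit list
  set psB := (PySem.List.pyRange sx (bx + 1) 1).flatMap (fun i => [(i, sy), (i, byy)]) ++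
      ((PySem.List.pyRange sy (byy + 1) 1).flatMap (fun j => [(sx, j), (bx, j)]) ++
       (PySem.List.pyRange (sx + 1) bx 1).flatMap
         (fun i => (PySem.List.pyRange (sy + 1) byy 1).map (fun j => (i, j)))) with hpsB
  have hb1 : (fun (g : List (List Int)) (i : Int) => pvPaint (pvPaint g i sy 3) i byy 3)
      = (fun g i => pvStepA sx bx sy byy (pvStepA sx bx sy byy g i sy) i byy) := by
    funext g i
    rw [pvStepA_eq_paint sx bx sy byy g i sy, if_pos (Or.inr (Or.inl rfl))]
    rw [pvStepA_eq_paint sx bx sy byy _ i byy, if_pos (Or.inr (Or.inr (Or.inr rfl)))]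
  have hb2 : (fun (g : List (List Int)) (j : Int) => pvPaint (pvPaint g sx j 3) bx j 3)
      = (fun g j => pvStepA sx bx sy byy (pvStepA sx bx sy byy g sx j) bx j) := by
    funext g j
    rw [pvStepA_eq_paint sx bx sy byy g sx j, if_pos (Or.inl rfl)]
    rw [pvStepA_eq_paint sx bx sy byy _ bx j, if_pos (Or.inr (Or.inr (Or.inl rfl)))]
  have hB : (PySem.List.pyRange (sx + 1) bx 1).foldl
      (fun g i => (PySem.List.pyRange (sy + 1) byy 1).foldl
        (fun g j => pvPaint g i j 5) g)
      ((PySem.List.pyRange sy (byy + 1) 1).foldl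
        (fun g j => pvPaint (pvPaint g sx j 3) bx j 3)
        ((PySem.List.pyRange sx (bx + 1) 1).foldl
          (fun g i => pvPaint (pvPaint g i sy 3) i byy 3) g0))
      = psB.foldl (fun g p => pvStepA sx bx sy byy g p.1 p.2) g0 := by
    rw [hb1, hb2, hpsB, List.foldl_append, List.foldl_append, List.foldl_flatMap,
      List.foldl_flatMap, List.foldl_flatMap]
    simp only [List.foldl_cons, List.foldl_nil, List.foldl_map]
    apply PySem.List.foldl_congr_mem
    intro acc i hi
    apply PySem.List.foldl_congr_mem
    intro acc' j hj
    rw [PySem.List.mem_pyRange_one] at hi hj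
    rw [pvStepA_eq_paint, if_neg (by omega)]
  rw [hA, hB]
  have hstart : g0 = pvMapGrid (fun _ _ v => v) g0 := (pvMapGrid_id g0).symm
  rw [hstart]
  rw [pvFoldGen sx bx sy byy g0 psA
      (fun p hp => by
        rw [hpsA, pv_mem_psA] at hp
        exact hmaster p hp.1 hp.2.1 hp.2.2.1 hp.2.2.2) _,
    pvFoldGen sx bx sy byy g0 psB
      (fun p hp => by
        rw [hpsB, pv_mem_psB sx bx sy byy hxle hyle] at hp
        exact hmaster p hp.1 hp.2.1 hp.2.2.1 hp.2.2.2) _]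
  congr 1
  funext k l v
  have hmemAB : ∀ p : Int × Int, p ∈ psA ↔ p ∈ psB := fun p => by
    rw [hpsA, hpsB, pv_mem_psA, pv_mem_psB sx bx sy byy hxle hyle]
  rw [pvSeq_spec, pvSeq_spec]
  have he1 : (∃ p ∈ psA.filter (fun p => pvPhys g0 p = (k, l)),
        ¬(p.1 = sx ∨ p.2 = sy ∨ p.1 = bx ∨ p.2 = byy))
      ↔ (∃ p ∈ psB.filter (fun p => pvPhys g0 p = (k, l)),
        ¬(p.1 = sx ∨ p.2 = sy ∨ p.1 = bx ∨ p.2 = byy)) := by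
    simp only [List.mem_filter]
    constructor
    · rintro ⟨p, ⟨hp, hf⟩, hb⟩
      exact ⟨p, ⟨(hmemAB p).mp hp, hf⟩, hb⟩
    · rintro ⟨p, ⟨hp, hf⟩, hb⟩
      exact ⟨p, ⟨(hmemAB p).mpr hp, hf⟩, hb⟩
  have he2 : (psA.filter (fun p => pvPhys g0 p = (k, l)) = [])
      ↔ (psB.filter (fun p => pvPhys g0 p = (k, l)) = []) := by
    simp only [List.filter_eq_nil_iff]
    constructor
    · intro hA' p hp
      exact hA' p ((hmemAB p).mpr hp)
    · intro hB' p hp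
      exact hB' p ((hmemAB p).mp hp)
  rw [if_congr Iff.rfl (if_congr he1 rfl (if_congr he2 rfl rfl)) rfl]
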